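-- pv_equiv track=rewrite | github.com/funcwj/portable-decoder | python/kaldi_raw_tdnn/tdnn.py | _parse_tdnn_config
-- ===== SOURCE A (Python) =====
-- import operator
--
-- def _parse_tdnn_config(conf):
--     tokens = conf.split(";")
--     context = []
--     for token in tokens:
--         ctx = list(map(int, token.split(",")))
--         if not operator.eq(ctx, sorted(ctx)):
--             raise ValueError(
--                 "Context configure in TDNN must in ascend order: {}".
--                 format(token))
--         context.append(ctx)
--     return context
-- ===== SOURCE B (Python) =====
-- def _parse_tdnn_config(conf):
--     context = []
--     for token in conf.split(";"):
--         ctx = []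
--         prev = None
--         for part in token.split(","):
--             v = int(part)
--             if prev is not None and v < prev:
--                 raise ValueError(
--                     "Context configure in TDNN must in ascend order: {}".
--                     format(token))
--             ctx.append(v)
--             prev = v
--         context.append(ctx)
--     return context
-- ===== Notes on version B (the rewrite author's own statement) =====
-- stated objective: alternative
-- what changed: B fuses parsing and validation into one pass per token, tracking the previous value and raising on the first descent, instead of A's map-then-sort-then-compare (no sort, no copy).
import Mathlib
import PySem

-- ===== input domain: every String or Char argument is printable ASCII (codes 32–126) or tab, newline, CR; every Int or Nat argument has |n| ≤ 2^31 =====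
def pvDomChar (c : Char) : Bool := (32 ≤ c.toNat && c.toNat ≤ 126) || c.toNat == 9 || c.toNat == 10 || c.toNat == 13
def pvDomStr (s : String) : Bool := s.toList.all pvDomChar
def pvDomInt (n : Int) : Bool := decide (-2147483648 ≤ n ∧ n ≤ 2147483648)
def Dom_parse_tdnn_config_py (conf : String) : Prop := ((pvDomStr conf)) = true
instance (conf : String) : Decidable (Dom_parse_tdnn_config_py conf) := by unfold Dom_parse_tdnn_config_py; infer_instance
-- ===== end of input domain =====

-- B fuses parsing and validation into one previous-value pass per token instead of A's
-- map-then-sort-then-compare; equivalence is proved on the inputs where A returns (no ValueError).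

-- ===== PORT A =====
-- A: for each ';'-token, ctx = list(map(int, token.split(','))); raise if ctx ≠ sorted(ctx); append.
-- raise is modelled by returning the context built so far (unreachable under Pre_).
def parseCtxA (t : String) : List Int :=
  ((PySem.Str.split? t ",").getD []).map (fun s => (PySem.Int.ofStr? s).getD 0)

def parseGoA : List String → List (List Int) → List (List Int)
  | [], acc => acc
  | t :: rest, acc =>
    let ctx := parseCtxA t
    if ctx = PySem.List.sorted ctx (fun x => x) false then parseGoA rest (acc ++ [ctx])
    else acc

def parse_tdnn_config_py (conf : String) : List (List Int) :=
  parseGoA ((PySem.Str.split? conf ";").getD []) []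

-- ===== PORT B =====
-- B: inner loop over parts with 'prev' state; none models the raise (unreachable under Pre_).
def parseTokB (prev : Option Int) : List String → Option (List Int)
  | [] => some []
  | p :: ps =>
    let v := (PySem.Int.ofStr? p).getD 0
    match prev with
    | some q =>
      if v < q then none
      else (parseTokB (some v) ps).map (fun ctx => v :: ctx)
    | none => (parseTokB (some v) ps).map (fun ctx => v :: ctx)

def parseGoB : List String → List (List Int)
  | [] => []
  | t :: ts =>
    match parseTokB none ((PySem.Str.split? t ",").getD []) with
    | none => []
    | some ctx => ctx :: parseGoB ts

def parse_tdnn_config_py_alt (conf : String) : List (List Int) :=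
  parseGoB ((PySem.Str.split? conf ";").getD [])

-- ===== PRECONDITION & SPEC =====
-- Pre_ excludes exactly the inputs where Python A raises ValueError: a comma part that is not
-- an int literal (int() raises) or a token whose parsed ints are not nondecreasing (A's explicit raise).
def Pre_parse_tdnn_config_py (conf : String) : Prop :=
  ∀ t ∈ (PySem.Str.split? conf ";").getD [],
    (∀ p ∈ (PySem.Str.split? t ",").getD [], (PySem.Int.ofStr? p).isSome = true) ∧
    List.IsChain (· ≤ ·) (((PySem.Str.split? t ",").getD []).map (fun s => (PySem.Int.ofStr? s).getD 0))

instance (conf : String) : Decidable (Pre_parse_tdnn_config_py conf) := by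
  unfold Pre_parse_tdnn_config_py; infer_instance

def pvWitness_parse_tdnn_config_py : String := "-2,-1,0;1,1,2"

def Spec_parse_tdnn_config_py (conf : String) (out : List (List Int)) : Prop := out = parse_tdnn_config_py_alt conf
instance (conf : String) (out : List (List Int)) : Decidable (Spec_parse_tdnn_config_py conf out) := by unfold Spec_parse_tdnn_config_py; infer_instance

-- ===== CLAIM (what is proved, stated in full; the proofs are below) =====
def Claim_equal_parse_tdnn_config_py : Prop := ∀ (conf : String), Dom_parse_tdnn_config_py conf → Pre_parse_tdnn_config_py conf → Spec_parse_tdnn_config_py conf (parse_tdnn_config_py conf)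

-- ===== LEMMAS AND PROOFS =====

-- B's fused pass returns the parsed list when the values (prefixed by prev) are nondecreasing.
theorem parseTokB_of_chain (ps : List String) : ∀ (prev : Option Int),
    List.IsChain (· ≤ ·) ((prev.toList) ++ ps.map (fun s => (PySem.Int.ofStr? s).getD 0)) →
    parseTokB prev ps = some (ps.map (fun s => (PySem.Int.ofStr? s).getD 0)) := by
  induction ps with
  | nil => intro prev _; rfl
  | cons p ps ih =>
    intro prev h
    cases prev with
    | none =>
      simp only [parseTokB]
      rw [ih (some ((PySem.Int.ofStr? p).getD 0))]
      · rfl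
      · simpa using h
    | some q =>
      simp only [Option.toList, List.map_cons, List.singleton_append, List.isChain_cons_cons] at h
      simp only [parseTokB]
      rw [if_neg (by omega), ih (some ((PySem.Int.ofStr? p).getD 0)) (by simpa using h.2)]
      rfl

-- A's loop with the accumulator equals cons-building B, token by token, under Pre_'s conditions.
theorem go_eq (ts : List String)
    (h : ∀ t ∈ ts, List.IsChain (· ≤ ·) (((PySem.Str.split? t ",").getD []).map (fun s => (PySem.Int.ofStr? s).getD 0))) :
    ∀ acc, parseGoA ts acc = acc ++ parseGoB ts := by
  induction ts with
  | nil => intro acc; simp [parseGoA, parseGoB]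
  | cons t ts ih =>
    intro acc
    have hc := h t (by simp)
    have hpw : (parseCtxA t).Pairwise (· ≤ ·) := List.isChain_iff_pairwise.mp hc
    have hsorted : PySem.List.sorted (parseCtxA t) (fun x => x) false = parseCtxA t :=
      PySem.List.sorted_eq_self_of_pairwise (parseCtxA t) (fun x => x) hpw
    have hb : parseGoB (t :: ts) = parseCtxA t :: parseGoB ts := by
      simp only [parseGoB]
      rw [parseTokB_of_chain _ none (by simpa using hc)]
      rfl
    rw [hb]
    simp only [parseGoA]
    rw [hsorted, if_pos rfl, ih (fun x hx => h x (by simp [hx]))]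
    simp

-- ===== VERDICT (by name: the statement is the Claim_ definition above) =====
theorem parse_tdnn_config_py_spec : Claim_equal_parse_tdnn_config_py := by
  intro conf _ hpre
  unfold Spec_parse_tdnn_config_py parse_tdnn_config_py parse_tdnn_config_py_alt
  rw [go_eq _ (fun t ht => (hpre t ht).2) []]
  rfl
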